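-- pv_equiv track=rewrite | github.com/shchoy/ai-agent-mvp3 | src/core/document_processor.py | extract_key_sections
-- ===== SOURCE A (Python) =====
-- from typing import Dict, List, Tuple
--
-- def extract_key_sections(text: str) -> Dict[str, str]:
--     """
--     Extract key sections from document text
--
--     Args:
--         text: Document text
--
--     Returns:
--         Dictionary of section_name -> section_content
--     """
--     sections = {}
--     lines = text.split('\n')
--     current_section = "general"
--     current_content = []
--
--     section_keywords = {
--         'requirements': ['requirement', 'specification', 'technical', 'functional'],
--         'scope': ['scope', 'deliverable', 'work', 'service'],
--         'timeline': ['timeline', 'schedule', 'deadline', 'milestone'],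
--         'pricing': ['price', 'cost', 'budget', 'financial', 'payment'],
--         'terms': ['terms', 'condition', 'contract', 'legal'],
--         'contact': ['contact', 'person', 'email', 'phone', 'address']
--     }
--
--     for line in lines:
--         line_lower = line.lower().strip()
--
--         # Check if line is a section header
--         section_found = False
--         for section_name, keywords in section_keywords.items():
--             if any(keyword in line_lower for keyword in keywords) and len(line.strip()) < 100:
--                 # Save previous section
--                 if current_content:
--                     sections[current_section] = '\n'.join(current_content).strip()
--
--                 # Start new section
--                 current_section = section_name
--                 current_content = []
--                 section_found = True
--                 break
--
--         if not section_found: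
--             current_content.append(line)
--
--     # Save final section
--     if current_content:
--         sections[current_section] = '\n'.join(current_content).strip()
--
--     return sections
-- ===== SOURCE B (Python) =====
-- def extract_key_sections(text: str):
--     """Boundary-index re-implementation: locate all header lines first, then slice the
--     line list between consecutive boundaries and materialize the non-empty chunks."""
--     section_keywords = {
--         'requirements': ['requirement', 'specification', 'technical', 'functional'],
--         'scope': ['scope', 'deliverable', 'work', 'service'],
--         'timeline': ['timeline', 'schedule', 'deadline', 'milestone'],
--         'pricing': ['price', 'cost', 'budget', 'financial', 'payment'],
--         'terms': ['terms', 'condition', 'contract', 'legal'],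
--         'contact': ['contact', 'person', 'email', 'phone', 'address']
--     }
--
--     def classify(line):
--         if len(line.strip()) >= 100:
--             return None
--         ll = line.lower().strip()
--         for name, kws in section_keywords.items():
--             if any(k in ll for k in kws):
--                 return name
--         return None
--
--     lines = text.split('\n')
--     headers = [(i, name) for i, line in enumerate(lines)
--                for name in [classify(line)] if name is not None]
--
--     starts = [(0, 'general')] + [(i + 1, name) for i, name in headers]
--     ends = [i for i, _ in headers] + [len(lines)]
--
--     result = {}
--     for (start, name), end in zip(starts, ends):
--         chunk = lines[start:end]
--         if chunk:
--             result[name] = '\n'.join(chunk).strip()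
--     return result
-- ===== Notes on version B (the rewrite author's own statement) =====
-- stated objective: alternative
-- what changed: B abandons A's streaming scan with a running buffer and a flush-on-header dict update: it first computes the list of header positions (index, section) over enumerate(lines), derives the boundary pairs, and then builds each section's content by slicing the original line list between consecutive boundaries, inserting non-empty slices into the dict.
import Mathlib
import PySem

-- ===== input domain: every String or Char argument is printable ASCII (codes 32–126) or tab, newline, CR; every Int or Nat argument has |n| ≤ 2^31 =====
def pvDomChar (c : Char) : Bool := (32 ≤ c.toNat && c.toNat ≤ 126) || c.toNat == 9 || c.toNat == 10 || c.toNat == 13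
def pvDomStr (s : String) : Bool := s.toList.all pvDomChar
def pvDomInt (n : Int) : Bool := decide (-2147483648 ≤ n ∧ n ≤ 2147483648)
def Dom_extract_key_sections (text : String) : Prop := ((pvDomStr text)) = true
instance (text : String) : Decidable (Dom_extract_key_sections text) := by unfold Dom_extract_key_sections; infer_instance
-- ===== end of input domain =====

-- B replaces A's streaming flush-on-header scan by: locate the header positions first, then slice the
-- line list between consecutive boundaries — objective: alternative decomposition, same cost.

-- shared literal constant: the section_keywords dict of both Pythons
def pvSectionKeywords : List (String × List String) :=
  [("requirements", ["requirement", "specification", "technical", "functional"]),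
   ("scope", ["scope", "deliverable", "work", "service"]),
   ("timeline", ["timeline", "schedule", "deadline", "milestone"]),
   ("pricing", ["price", "cost", "budget", "financial", "payment"]),
   ("terms", ["terms", "condition", "contract", "legal"]),
   ("contact", ["contact", "person", "email", "phone", "address"])]

-- ===== PORT A =====
-- A's inner 'for section_name, keywords … break' loop: first section whose keyword matches (with the len<100 test inside each iteration, as in A)
def pvAFind (lineLower : String) (line : String) : List (String × List String) → Option String
  | [] => none
  | (name, kws) :: rest =>
      if kws.any (fun k => PySem.Str.isIn k lineLower) && decide (PySem.Str.len (PySem.Str.strip line) < 100)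
      then some name
      else pvAFind lineLower line rest

-- A's loop body over the state (sections, current_section, current_content)
def pvAStep (st : PySem.Dict String String × String × List String) (line : String) :
    PySem.Dict String String × String × List String :=
  match pvAFind (PySem.Str.strip (PySem.Str.lower line)) line pvSectionKeywords with
  | some name =>
      ((if st.2.2.isEmpty then st.1
        else st.1.insert st.2.1 (PySem.Str.strip (PySem.Str.join "\n" st.2.2))), name, ([] : List String))
  | none => (st.1, st.2.1, st.2.2 ++ [line])

-- A's trailing 'save final section' plus the return of the dict
def pvAFinal (st : PySem.Dict String String × String × List String) : List (String × String) :=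
  (if st.2.2.isEmpty then st.1
   else st.1.insert st.2.1 (PySem.Str.strip (PySem.Str.join "\n" st.2.2))).items

def extract_key_sections (text : String) : List (String × String) :=
  -- text.split('\n'): split? is exact; the separator "\n" is non-empty, so it is always `some`
  pvAFinal (((PySem.Str.split? text "\n").getD []).foldl pvAStep
    ((PySem.Dict.empty : PySem.Dict String String), "general", ([] : List String)))

-- ===== PORT B =====
-- B's classify helper: None for long lines, else the first matching section name
def pvClassify (line : String) : Option String :=
  if 100 ≤ PySem.Str.len (PySem.Str.strip line) then none
  else
    (pvSectionKeywords.find? (fun p =>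
       p.2.any (fun k => PySem.Str.isIn k (PySem.Str.strip (PySem.Str.lower line))))).map (·.1)

-- B's header index pass: [(i, name) for i, line in enumerate(lines) for name in [classify(line)] if name is not None]
def pvBHeaders (lines : List String) : List (Int × String) :=
  (PySem.List.enumerate lines 0).filterMap (fun p => (pvClassify p.2).map (fun n => (p.1, n)))

def extract_key_sections_alt (text : String) : List (String × String) :=
  let lines := (PySem.Str.split? text "\n").getD []
  let headers := pvBHeaders lines
  let starts := (((0 : Int), "general")) :: headers.map (fun p => (p.1 + 1, p.2))
  let ends := headers.map (·.1) ++ [PySem.List.len lines]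
  ((starts.zip ends).foldl
     (fun d q =>
        let chunk := PySem.List.slice lines (some q.1.1) (some q.2)
        if chunk.isEmpty then d
        else d.insert q.1.2 (PySem.Str.strip (PySem.Str.join "\n" chunk)))
     (PySem.Dict.empty : PySem.Dict String String)).items

-- ===== PRECONDITION & SPEC =====
def Spec_extract_key_sections (text : String) (out : List (String × String)) : Prop := out = extract_key_sections_alt text
instance (text : String) (out : List (String × String)) : Decidable (Spec_extract_key_sections text out) := by unfold Spec_extract_key_sections; infer_instance

-- ===== CLAIM =====
def Claim_equal_extract_key_sections : Prop := ∀ (text : String), Dom_extract_key_sections text → Spec_extract_key_sections text (extract_key_sections text)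

-- ===== LEMMAS AND PROOFS =====

-- proof-side recursive characterisation of the segmentation (used by both directions)
def pvSegs : String → List String → List (String × List String)
  | cur, [] => [(cur, [])]
  | cur, l :: ls =>
    match pvClassify l with
    | some n => (cur, []) :: pvSegs n ls
    | none =>
      match pvSegs cur ls with
      | [] => []
      | (c, cs) :: rest => (c, l :: cs) :: rest

def pvPrep (c : List String) : List (String × List String) → List (String × List String)
  | [] => []
  | (n, cs) :: rest => (n, c ++ cs) :: rest

def pvMatStep (d : PySem.Dict String String) (p : String × List String) : PySem.Dict String String :=
  if p.2.isEmpty then d else d.insert p.1 (PySem.Str.strip (PySem.Str.join "\n" p.2))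

def pvChnk (L : List String) (q : (Int × String) × Int) : String × List String :=
  (q.1.2, PySem.List.slice L (some q.1.1) (some q.2))

def pvChunks (g : String) (lines : List String) : List (String × List String) :=
  ((((0 : Int), g) :: (pvBHeaders lines).map (fun p => (p.1 + 1, p.2))).zip
     ((pvBHeaders lines).map (·.1) ++ [PySem.List.len lines])).map (pvChnk lines)

-- A's finder (per-iteration len test) equals B's one global len test followed by find?
theorem pvEnumShift {α : Type} (xs : List α) (s : Int) :
    PySem.List.enumerate xs (s + 1) = (PySem.List.enumerate xs s).map (fun p => (p.1 + 1, p.2)) := by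
  induction xs generalizing s with
  | nil => simp [PySem.List.enumerate_nil]
  | cons x t ih => simp [PySem.List.enumerate_cons, ih]

theorem pvFilterShift (L : List (Int × String)) :
    (L.map (fun p => (p.1 + 1, p.2))).filterMap
        (fun p => (pvClassify p.2).map (fun n => (p.1, n))) =
      (L.filterMap (fun p => (pvClassify p.2).map (fun n => (p.1, n)))).map
        (fun p => (p.1 + 1, p.2)) := by
  induction L with
  | nil => rfl
  | cons h t ih =>
      simp only [List.map_cons, List.filterMap_cons]
      cases hcl : pvClassify h.2 with
      | none => simp only [Option.map_none, ih]
      | some n => simp only [Option.map_some, ih, List.map_cons]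

theorem pvBHeaders_cons (l : String) (ls : List String) :
    pvBHeaders (l :: ls) =
      (match pvClassify l with | some n => [((0 : Int), n)] | none => []) ++
        (pvBHeaders ls).map (fun p => (p.1 + 1, p.2)) := by
  unfold pvBHeaders
  rw [PySem.List.enumerate_cons, List.filterMap_cons,
      show (0 : Int) + 1 = 0 + 1 from rfl, pvEnumShift, pvFilterShift]
  cases pvClassify l <;> simp

theorem pvBHeaders_nonneg (lines : List String) : ∀ p ∈ pvBHeaders lines, 0 ≤ p.1 := by
  induction lines with
  | nil => intro p hp; simp [pvBHeaders, PySem.List.enumerate_nil] at hp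
  | cons l ls ih =>
      intro p hp
      rw [pvBHeaders_cons] at hp
      rcases List.mem_append.mp hp with h | h
      · cases hcl : pvClassify l <;> simp [hcl] at h
        rw [h]
      · obtain ⟨q, hq, hqe⟩ := List.mem_map.mp h
        have h0 := ih q hq
        have : p.1 = q.1 + 1 := by rw [← hqe]
        omega

theorem pvSliceSucc {α : Type} (l : α) (ls : List α) (a b : Int) (ha : 0 ≤ a) (hb : 0 ≤ b) :
    PySem.List.slice (l :: ls) (some (a + 1)) (some (b + 1)) =
      PySem.List.slice ls (some a) (some b) := by
  rw [PySem.List.slice_toNat _ (by omega) (by omega), PySem.List.slice_toNat _ ha hb,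
      show (a + 1).toNat = a.toNat + 1 by omega, show (b + 1).toNat = b.toNat + 1 by omega,
      List.drop_succ_cons, show b.toNat + 1 - (a.toNat + 1) = b.toNat - a.toNat by omega]

theorem pvSliceZeroSucc {α : Type} (l : α) (ls : List α) (b : Int) (hb : 0 ≤ b) :
    PySem.List.slice (l :: ls) (some 0) (some (b + 1)) =
      l :: PySem.List.slice ls (some 0) (some b) := by
  rw [PySem.List.slice_toNat _ (by omega) (by omega), PySem.List.slice_toNat _ (by omega) hb,
      show ((0 : Int)).toNat = 0 from rfl, show (b + 1).toNat = b.toNat + 1 by omega]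
  simp

-- generic shift of chunk pairs from (l :: ls) to ls
theorem pvZipShift (l : String) (ls : List String) (T : List (Int × String)) (E : List Int)
    (hT : ∀ p ∈ T, 0 ≤ p.1) (hE : ∀ e ∈ E, 0 ≤ e) :
    ((T.map (fun p => (p.1 + 1, p.2))).zip (E.map (fun x => x + 1))).map (pvChnk (l :: ls)) =
      (T.zip E).map (pvChnk ls) := by
  rw [List.zip_map, List.map_map]
  apply List.map_congr_left
  intro q hq
  obtain ⟨⟨q1, q2⟩, rfl⟩ : ∃ r : (Int × String) × Int, r = q := ⟨q, rfl⟩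
  obtain ⟨hq1, hq2⟩ := List.of_mem_zip hq
  have h1 : 0 ≤ q1.1 := hT _ hq1
  have h2 : 0 ≤ q2 := hE _ hq2
  simp only [Function.comp, pvChnk, Prod.map]
  exact congrArg _ (pvSliceSucc l ls q1.1 q2 h1 h2)

set_option maxHeartbeats 1000000 in
theorem pvChunks_eq_segs (lines : List String) : ∀ g, pvChunks g lines = pvSegs g lines := by
  induction lines with
  | nil =>
      intro g
      simp [pvChunks, pvBHeaders, PySem.List.enumerate_nil, pvChnk, pvSegs,
            PySem.List.slice_toNat, PySem.List.len_eq]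
  | cons l ls ih =>
      intro g
      have hE' : ∀ e ∈ (pvBHeaders ls).map (·.1) ++ [PySem.List.len ls], 0 ≤ e := by
        intro e he
        rcases List.mem_append.mp he with h | h
        · obtain ⟨p, hp, hpe⟩ := List.mem_map.mp h
          have h0 := pvBHeaders_nonneg ls p hp
          rw [← hpe]; exact h0
        · simp only [List.mem_singleton] at h
          rw [h, PySem.List.len_eq]; positivity
      have hlen : PySem.List.len (l :: ls) = PySem.List.len ls + 1 := by
        simp only [PySem.List.len_eq, List.length_cons]; omega
      unfold pvChunks
      rw [pvBHeaders_cons, hlen]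
      cases hc : pvClassify l with
      | some n =>
          have hT : ∀ p ∈ ((0 : Int), n) :: (pvBHeaders ls).map (fun p => (p.1 + 1, p.2)), 0 ≤ p.1 := by
            intro p hp
            rcases List.mem_cons.mp hp with h | h
            · rw [h]
            · obtain ⟨q, hq, hqe⟩ := List.mem_map.mp h
              have h0 := pvBHeaders_nonneg ls q hq
              have he : p.1 = q.1 + 1 := by rw [← hqe]
              omega
          have htail := pvZipShift l ls (((0 : Int), n) :: (pvBHeaders ls).map (fun p => (p.1 + 1, p.2)))
            ((pvBHeaders ls).map (·.1) ++ [PySem.List.len ls]) hT hE'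
          have hch : ((((0 : Int), n) :: (pvBHeaders ls).map (fun p => (p.1 + 1, p.2))).zip
              ((pvBHeaders ls).map (·.1) ++ [PySem.List.len ls])).map (pvChnk ls) = pvSegs n ls := by
            rw [← ih n]; unfold pvChunks; rfl
          simp only [List.map_cons, List.map_append, List.map_map] at htail ⊢
          simp only [List.cons_append, List.zip_cons_cons, List.map_cons]
          rw [show pvChnk (l :: ls) (((0 : Int), g), (0 : Int)) = (g, []) by
                simp [pvChnk, PySem.List.slice_toNat]]
          simp only [pvSegs, hc]
          congr 1
          rw [← hch, ← htail]
          congr 1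
      | none =>
          obtain ⟨e0, erest, hEx⟩ : ∃ e0 erest,
              (pvBHeaders ls).map (·.1) ++ [PySem.List.len ls] = e0 :: erest := by
            cases h : (pvBHeaders ls).map (·.1) with
            | nil => exact ⟨PySem.List.len ls, [], by simp⟩
            | cons a t => exact ⟨a, t ++ [PySem.List.len ls], rfl⟩
          have he0 : 0 ≤ e0 := hE' e0 (by rw [hEx]; exact List.mem_cons_self)
          have herest : ∀ e ∈ erest, 0 ≤ e := fun e he =>
            hE' e (by rw [hEx]; exact List.mem_cons_of_mem _ he)
          have hT : ∀ p ∈ (pvBHeaders ls).map (fun p => (p.1 + 1, p.2)), 0 ≤ p.1 := by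
            intro p hp
            obtain ⟨q, hq, hqe⟩ := List.mem_map.mp hp
            have h0 := pvBHeaders_nonneg ls q hq
            have he : p.1 = q.1 + 1 := by rw [← hqe]
            omega
          have htail := pvZipShift l ls ((pvBHeaders ls).map (fun p => (p.1 + 1, p.2))) erest hT herest
          have e2 : ((pvBHeaders ls).map (fun p => (p.1 + 1, p.2))).map (·.1) ++
              [PySem.List.len ls + 1] = (e0 + 1) :: erest.map (fun x => x + 1) := by
            have h1 : ((pvBHeaders ls).map (fun p => (p.1 + 1, p.2))).map (·.1) ++
                [PySem.List.len ls + 1] =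
                ((pvBHeaders ls).map (·.1) ++ [PySem.List.len ls]).map (fun x => x + 1) := by
              simp [List.map_map]
            rw [h1, hEx]; rfl
          have hsegs : pvSegs g ls = (g, PySem.List.slice ls (some 0) (some e0)) ::
              (((pvBHeaders ls).map (fun p => (p.1 + 1, p.2))).zip erest).map (pvChnk ls) := by
            rw [← ih g]; unfold pvChunks; rw [hEx]
            simp [pvChnk]
          rw [List.nil_append, e2]
          simp only [List.zip_cons_cons, List.map_cons]
          rw [show pvChnk (l :: ls) (((0 : Int), g), e0 + 1) =
                (g, l :: PySem.List.slice ls (some 0) (some e0)) by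
              simp only [pvChnk]; rw [pvSliceZeroSucc l ls e0 he0]]
          simp only [pvSegs, hc, hsegs]
          rw [← htail]

-- A's finder (per-iteration len test) equals B's one global len test followed by find?
theorem pvAFind_eq_aux (lineLower line : String) (kws : List (String × List String)) :
    pvAFind lineLower line kws =
      (if 100 ≤ PySem.Str.len (PySem.Str.strip line) then none
       else (kws.find? (fun p => p.2.any (fun k => PySem.Str.isIn k lineLower))).map (·.1)) := by
  induction kws with
  | nil => simp [pvAFind]
  | cons hd tl ih =>
      obtain ⟨name, ks⟩ := hd
      have hstep : pvAFind lineLower line ((name, ks) :: tl) =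
          if ks.any (fun k => PySem.Str.isIn k lineLower) &&
             decide (PySem.Str.len (PySem.Str.strip line) < 100)
          then some name else pvAFind lineLower line tl := rfl
      by_cases hl : 100 ≤ PySem.Str.len (PySem.Str.strip line)
      · have h1 : decide (PySem.Str.len (PySem.Str.strip line) < 100) = false := by
          simp only [decide_eq_false_iff_not]; omega
        simp only [hstep, h1, Bool.and_false, Bool.false_eq_true, if_false, ih, if_pos hl]
      · have h1 : decide (PySem.Str.len (PySem.Str.strip line) < 100) = true := by
          simp only [decide_eq_true_eq]; omega
        cases hm : ks.any (fun k => PySem.Str.isIn k lineLower) with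
        | true =>
            have hp : (fun p : String × List String =>
                p.2.any (fun k => PySem.Str.isIn k lineLower)) (name, ks) = true := hm
            rw [hstep, hm, h1, if_neg hl,
                List.find?_cons_of_pos (p := fun q : String × List String =>
                  q.2.any (fun k => PySem.Str.isIn k lineLower)) (a := (name, ks)) (l := tl) hp]
            rfl
        | false =>
            have hp : ¬ (fun p : String × List String =>
                p.2.any (fun k => PySem.Str.isIn k lineLower)) (name, ks) = true := by
              rw [show ((fun p : String × List String =>
                p.2.any (fun k => PySem.Str.isIn k lineLower)) (name, ks)) =
                  ks.any (fun k => PySem.Str.isIn k lineLower) from rfl, hm]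
              exact Bool.false_ne_true
            rw [hstep, hm,
                List.find?_cons_of_neg (p := fun q : String × List String =>
                  q.2.any (fun k => PySem.Str.isIn k lineLower)) (a := (name, ks)) (l := tl) hp,
                ih, if_neg hl]
            rfl

theorem pvClassify_eq (line : String) :
    pvClassify line = pvAFind (PySem.Str.strip (PySem.Str.lower line)) line pvSectionKeywords := by
  rw [pvAFind_eq_aux]; rfl

theorem pvPrep_nil (s : List (String × List String)) : pvPrep [] s = s := by
  cases s with
  | nil => rfl
  | cons h t => obtain ⟨n, cs⟩ := h; simp [pvPrep]

theorem pvSegs_ne_nil (cur : String) (ls : List String) : pvSegs cur ls ≠ [] := by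
  induction ls generalizing cur with
  | nil => simp [pvSegs]
  | cons l t ih =>
      simp only [pvSegs]
      cases pvClassify l with
      | some n => simp
      | none =>
          obtain ⟨s0, rest, h⟩ := List.exists_cons_of_ne_nil (ih cur)
          obtain ⟨c, cs⟩ := s0
          simp [h]

-- A's fold, flushed, materializes the recursive segmentation
theorem pvMainA (lines : List String) (d : PySem.Dict String String) (cur : String)
    (content : List String) :
    pvMatStep (lines.foldl pvAStep (d, cur, content)).1
        ((lines.foldl pvAStep (d, cur, content)).2.1, (lines.foldl pvAStep (d, cur, content)).2.2) =
      (pvPrep content (pvSegs cur lines)).foldl pvMatStep d := by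
  induction lines generalizing d cur content with
  | nil => simp [pvSegs, pvPrep, pvMatStep]
  | cons l rest ih =>
      simp only [List.foldl_cons]
      generalize hc : pvClassify l = c
      have hfind : pvAFind (PySem.Str.strip (PySem.Str.lower l)) l pvSectionKeywords = c := by
        rw [← pvClassify_eq, hc]
      cases c with
      | some name =>
          have hA : pvAStep (d, cur, content) l = (pvMatStep d (cur, content), name, []) := by
            unfold pvAStep pvMatStep; rw [hfind]
          rw [hA, ih]
          have hs : pvSegs cur (l :: rest) = (cur, []) :: pvSegs name rest := by
            simp [pvSegs, hc]
          rw [hs, pvPrep_nil]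
          simp [pvPrep, List.foldl_cons]
      | none =>
          have hA : pvAStep (d, cur, content) l = (d, cur, content ++ [l]) := by
            unfold pvAStep; rw [hfind]
          rw [hA, ih]
          obtain ⟨s0, srest, hs⟩ := List.exists_cons_of_ne_nil (pvSegs_ne_nil cur rest)
          obtain ⟨c0, cs0⟩ := s0
          have hseg : pvSegs cur (l :: rest) = (c0, l :: cs0) :: srest := by
            simp [pvSegs, hc, hs]
          rw [hs, hseg]
          simp [pvPrep]

-- B's port computes the materialized chunk list
theorem pvAltEq (text : String) :
    extract_key_sections_alt text =
      ((pvChunks "general" ((PySem.Str.split? text "\n").getD [])).foldl pvMatStep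
        (PySem.Dict.empty : PySem.Dict String String)).items := by
  unfold extract_key_sections_alt pvChunks
  rw [List.foldl_map]
  rfl

-- ===== VERDICT =====
theorem extract_key_sections_spec : Claim_equal_extract_key_sections := by
  intro text _
  show extract_key_sections text = extract_key_sections_alt text
  rw [pvAltEq, pvChunks_eq_segs]
  unfold extract_key_sections pvAFinal
  have h := pvMainA ((PySem.Str.split? text "\n").getD []) PySem.Dict.empty "general" []
  rw [pvPrep_nil] at h
  exact congrArg PySem.Dict.items h
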